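-- pv_equiv track=rewrite | github.com/alexandre-87mc/Python_Udemy_Basic | Projeto 1 - Jogo da velha.py | DRAW_GAME
-- ===== SOURCE A (Python) =====
-- def DRAW_GAME(entryX,entry0,st):
--
--     #Declare variables
--     posX = []
--     pos0 = []
--
--     #Initialize variables
--     posX = entryX
--     pos0 = entry0
--     L1 = '               &               &               '
--     L2 = '&&&&&&&&&&&&&&&&&&&&&&&&&&&&&&&&&&&&&&&&&&&&&&&'
--     seg1 = '               '
--     seg2 = '&               &'
--     seg3 = '               '
--     seg4 = '               '
--     seg5 = '&               &'
--     seg6 = '               '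
--     seg7 = '               '
--     seg8 = '&               &'
--     seg9 = '               '
--
--     #Draw the table
--     for k in range(0,18):
--         if len(pos0) != 0:
--             for i in pos0:
--                 if i == '1':
--                     seg1 = '       0       '
--                 elif i == '2':
--                     seg2 = '&      0        &'
--                 elif i == '3':
--                     seg3 = '       0        '
--                 elif i == '4':
--                     seg4 = '       0       '
--                 elif i == '5':
--                     seg5 = '&      0        &'
--                 elif i == '6':
--                     seg6 = '       0        '
--                 elif i == '7':
--                     seg7 = '       0       '
--                 elif i == '8':
--                     seg8 = '&      0        &'
--                 elif i == '9':
--                     seg9 = '       0        '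
--         if len(posX) != 0:
--             for i in posX:
--                 if i == '1':
--                     seg1 = '       X       '
--                 elif i == '2':
--                     seg2 = '&      X        &'
--                 elif i == '3':
--                     seg3 = '       X        '
--                 elif i == '4':
--                     seg4 = '       X       '
--                 elif i == '5':
--                     seg5 = '&      X        &'
--                 elif i == '6':
--                     seg6 = '       X        '
--                 elif i == '7':
--                     seg7 = '       X       '
--                 elif i == '8':
--                     seg8 = '&      X        &'
--                 elif i == '9':
--                     seg9 = '       X        '
--
--         #Print the table without shots
--         if len(pos0) == 0 and len(posX) == 0:
--             if k == 5 or k == 11: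
--                 st = st + L2 + '\n'
--             else:
--                 st = st + L1 + '\n'
--
--         #Print the players game
--         else:
--             if k == 5 or k == 11:
--                 st = st + L2 + '\n'
--             elif k == 2:
--                 st = st + seg1 + seg2 + seg3 + '\n'
--             elif k == 8:
--                 st = st + seg4 + seg5 + seg6 + '\n'
--             elif k == 14:
--                 st = st + seg7 + seg8 + seg9 + '\n'
--             else:
--                 st = st + L1 + '\n'
--     return st
-- ===== SOURCE B (Python) =====
-- def DRAW_GAME(entryX, entry0, st):
--     L1 = '               &               &               '
--     L2 = '&' * 47
--
--     # One segment: X wins over 0 (posX overrides are applied after pos0's in A).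
--     def seg(d, col):
--         if d in entryX:
--             m = 'X'
--         elif d in entry0:
--             m = '0'
--         else:
--             return '&               &' if col == 1 else '               '
--         if col == 0:
--             return '       ' + m + '       '
--         if col == 1:
--             return '&      ' + m + '        &'
--         return '       ' + m + '        '
--
--     row1 = seg('1', 0) + seg('2', 1) + seg('3', 2)
--     row2 = seg('4', 0) + seg('5', 1) + seg('6', 2)
--     row3 = seg('7', 0) + seg('8', 1) + seg('9', 2)
--
--     # The 18 board lines, written out directly (an untouched row equals L1).
--     lines = [L1, L1, row1, L1, L1, L2,
--              L1, L1, row2, L1, L1, L2,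
--              L1, L1, row3, L1, L1, L1]
--     return st + ''.join(line + '\n' for line in lines)
-- ===== Notes on version B (the rewrite author's own statement) =====
-- stated objective: faster
-- what changed: B drops A's 18-iteration outer loop that re-runs both override passes over entry0 and entryX before every line: it computes each of the nine segments once by direct membership tests (X wins over 0) and writes the 18 board lines out as a literal list, joining them onto st.
import Mathlib
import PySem

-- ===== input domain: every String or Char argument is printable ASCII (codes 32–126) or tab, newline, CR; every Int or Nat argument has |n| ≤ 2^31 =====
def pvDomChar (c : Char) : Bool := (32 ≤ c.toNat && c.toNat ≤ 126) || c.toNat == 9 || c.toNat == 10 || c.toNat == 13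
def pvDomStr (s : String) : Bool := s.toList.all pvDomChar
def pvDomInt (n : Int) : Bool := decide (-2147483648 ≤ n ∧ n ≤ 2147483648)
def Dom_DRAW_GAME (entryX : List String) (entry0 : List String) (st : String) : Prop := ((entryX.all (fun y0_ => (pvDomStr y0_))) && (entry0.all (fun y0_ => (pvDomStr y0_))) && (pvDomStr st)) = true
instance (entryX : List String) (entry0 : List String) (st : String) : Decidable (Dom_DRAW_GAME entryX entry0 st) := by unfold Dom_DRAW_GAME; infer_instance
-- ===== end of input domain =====

-- B replaces A's 18-iteration loop that re-runs both override passes every line by a single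
-- membership-based computation of the nine segments and a direct 18-line list (simpler).

-- ===== PORT A =====
structure Segs where
  s1 : String
  s2 : String
  s3 : String
  s4 : String
  s5 : String
  s6 : String
  s7 : String
  s8 : String
  s9 : String
deriving Repr, DecidableEq

-- inner 'for i in pos0' body
def applyO (s : Segs) (i : String) : Segs :=
  if i = "1" then { s with s1 := "       0       " }
  else if i = "2" then { s with s2 := "&      0        &" }
  else if i = "3" then { s with s3 := "       0        " }
  else if i = "4" then { s with s4 := "       0       " }
  else if i = "5" then { s with s5 := "&      0        &" }
  else if i = "6" then { s with s6 := "       0        " }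
  else if i = "7" then { s with s7 := "       0       " }
  else if i = "8" then { s with s8 := "&      0        &" }
  else if i = "9" then { s with s9 := "       0        " }
  else s

-- inner 'for i in posX' body
def applyX (s : Segs) (i : String) : Segs :=
  if i = "1" then { s with s1 := "       X       " }
  else if i = "2" then { s with s2 := "&      X        &" }
  else if i = "3" then { s with s3 := "       X        " }
  else if i = "4" then { s with s4 := "       X       " }
  else if i = "5" then { s with s5 := "&      X        &" }
  else if i = "6" then { s with s6 := "       X        " }
  else if i = "7" then { s with s7 := "       X       " }
  else if i = "8" then { s with s8 := "&      X        &" }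
  else if i = "9" then { s with s9 := "       X        " }
  else s

-- body of 'for k in range(0,18)'
def stepA (pos0 posX : List String) (acc : Segs × String) (k : Int) : Segs × String :=
  let segs := acc.1
  let st := acc.2
  let L1 := "               &               &               "
  let L2 := "&&&&&&&&&&&&&&&&&&&&&&&&&&&&&&&&&&&&&&&&&&&&&&&"
  let segs := if pos0.length ≠ 0 then pos0.foldl applyO segs else segs
  let segs := if posX.length ≠ 0 then posX.foldl applyX segs else segs
  let st :=
    if pos0.length = 0 ∧ posX.length = 0 then
      if k = 5 ∨ k = 11 then st ++ L2 ++ "\n" else st ++ L1 ++ "\n"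
    else
      if k = 5 ∨ k = 11 then st ++ L2 ++ "\n"
      else if k = 2 then st ++ segs.s1 ++ segs.s2 ++ segs.s3 ++ "\n"
      else if k = 8 then st ++ segs.s4 ++ segs.s5 ++ segs.s6 ++ "\n"
      else if k = 14 then st ++ segs.s7 ++ segs.s8 ++ segs.s9 ++ "\n"
      else st ++ L1 ++ "\n"
  (segs, st)

def segsInit : Segs :=
  ⟨"               ", "&               &", "               ",
   "               ", "&               &", "               ",
   "               ", "&               &", "               "⟩

def DRAW_GAME (entryX : List String) (entry0 : List String) (st : String) : String :=
  let posX := entryX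
  let pos0 := entry0
  ((PySem.List.pyRange 0 18 1).foldl (stepA pos0 posX) (segsInit, st)).2

-- ===== PORT B =====
def segB (entryX entry0 : List String) (d : String) (col : Int) : String :=
  match (if entryX.contains d then some "X" else if entry0.contains d then some "0" else none) with
  | none => if col = 1 then "&               &" else "               "
  | some m =>
      if col = 0 then "       " ++ m ++ "       "
      else if col = 1 then "&      " ++ m ++ "        &"
      else "       " ++ m ++ "        "

def DRAW_GAME_alt (entryX : List String) (entry0 : List String) (st : String) : String :=
  let L1 := "               &               &               "
  let L2 := String.ofList (List.replicate 47 '&')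
  let row1 := segB entryX entry0 "1" 0 ++ segB entryX entry0 "2" 1 ++ segB entryX entry0 "3" 2
  let row2 := segB entryX entry0 "4" 0 ++ segB entryX entry0 "5" 1 ++ segB entryX entry0 "6" 2
  let row3 := segB entryX entry0 "7" 0 ++ segB entryX entry0 "8" 1 ++ segB entryX entry0 "9" 2
  let lines := [L1, L1, row1, L1, L1, L2,
                L1, L1, row2, L1, L1, L2,
                L1, L1, row3, L1, L1, L1]
  st ++ String.join (lines.map (fun line => line ++ "\n"))

-- ===== PRECONDITION & SPEC =====
def Spec_DRAW_GAME (entryX : List String) (entry0 : List String) (st : String) (out : String) : Prop := out = DRAW_GAME_alt entryX entry0 st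
instance (entryX : List String) (entry0 : List String) (st : String) (out : String) : Decidable (Spec_DRAW_GAME entryX entry0 st out) := by unfold Spec_DRAW_GAME; infer_instance

-- ===== CLAIM (what is proved, stated in full; the proofs are below) =====
def Claim_equal_DRAW_GAME : Prop := ∀ (entryX : List String) (entry0 : List String) (st : String), Dom_DRAW_GAME entryX entry0 st → Spec_DRAW_GAME entryX entry0 st (DRAW_GAME entryX entry0 st)

-- ===== LEMMAS AND PROOFS =====

@[simp] theorem applyO_s1 (s : Segs) (a : String) :
    (applyO s a).s1 = if a = "1" then "       0       " else s.s1 := by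
  unfold applyO; split_ifs <;> simp_all

@[simp] theorem foldO_s1 (l : List String) (s : Segs) :
    (l.foldl applyO s).s1 = if "1" ∈ l then "       0       " else s.s1 := by
  induction l generalizing s with
  | nil => simp
  | cons a t ih =>
      rw [List.foldl_cons, ih]
      by_cases h : a = "1" <;> by_cases h2 : ("1" : String) ∈ t <;>
        simp [h, h2, eq_comm]

@[simp] theorem applyO_s2 (s : Segs) (a : String) :
    (applyO s a).s2 = if a = "2" then "&      0        &" else s.s2 := by
  unfold applyO; split_ifs <;> simp_all

@[simp] theorem foldO_s2 (l : List String) (s : Segs) :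
    (l.foldl applyO s).s2 = if "2" ∈ l then "&      0        &" else s.s2 := by
  induction l generalizing s with
  | nil => simp
  | cons a t ih =>
      rw [List.foldl_cons, ih]
      by_cases h : a = "2" <;> by_cases h2 : ("2" : String) ∈ t <;>
        simp [h, h2, eq_comm]

@[simp] theorem applyO_s3 (s : Segs) (a : String) :
    (applyO s a).s3 = if a = "3" then "       0        " else s.s3 := by
  unfold applyO; split_ifs <;> simp_all

@[simp] theorem foldO_s3 (l : List String) (s : Segs) :
    (l.foldl applyO s).s3 = if "3" ∈ l then "       0        " else s.s3 := by
  induction l generalizing s with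
  | nil => simp
  | cons a t ih =>
      rw [List.foldl_cons, ih]
      by_cases h : a = "3" <;> by_cases h2 : ("3" : String) ∈ t <;>
        simp [h, h2, eq_comm]

@[simp] theorem applyO_s4 (s : Segs) (a : String) :
    (applyO s a).s4 = if a = "4" then "       0       " else s.s4 := by
  unfold applyO; split_ifs <;> simp_all

@[simp] theorem foldO_s4 (l : List String) (s : Segs) :
    (l.foldl applyO s).s4 = if "4" ∈ l then "       0       " else s.s4 := by
  induction l generalizing s with
  | nil => simp
  | cons a t ih =>
      rw [List.foldl_cons, ih]
      by_cases h : a = "4" <;> by_cases h2 : ("4" : String) ∈ t <;>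
        simp [h, h2, eq_comm]

@[simp] theorem applyO_s5 (s : Segs) (a : String) :
    (applyO s a).s5 = if a = "5" then "&      0        &" else s.s5 := by
  unfold applyO; split_ifs <;> simp_all

@[simp] theorem foldO_s5 (l : List String) (s : Segs) :
    (l.foldl applyO s).s5 = if "5" ∈ l then "&      0        &" else s.s5 := by
  induction l generalizing s with
  | nil => simp
  | cons a t ih =>
      rw [List.foldl_cons, ih]
      by_cases h : a = "5" <;> by_cases h2 : ("5" : String) ∈ t <;>
        simp [h, h2, eq_comm]

@[simp] theorem applyO_s6 (s : Segs) (a : String) :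
    (applyO s a).s6 = if a = "6" then "       0        " else s.s6 := by
  unfold applyO; split_ifs <;> simp_all

@[simp] theorem foldO_s6 (l : List String) (s : Segs) :
    (l.foldl applyO s).s6 = if "6" ∈ l then "       0        " else s.s6 := by
  induction l generalizing s with
  | nil => simp
  | cons a t ih =>
      rw [List.foldl_cons, ih]
      by_cases h : a = "6" <;> by_cases h2 : ("6" : String) ∈ t <;>
        simp [h, h2, eq_comm]

@[simp] theorem applyO_s7 (s : Segs) (a : String) :
    (applyO s a).s7 = if a = "7" then "       0       " else s.s7 := by
  unfold applyO; split_ifs <;> simp_all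

@[simp] theorem foldO_s7 (l : List String) (s : Segs) :
    (l.foldl applyO s).s7 = if "7" ∈ l then "       0       " else s.s7 := by
  induction l generalizing s with
  | nil => simp
  | cons a t ih =>
      rw [List.foldl_cons, ih]
      by_cases h : a = "7" <;> by_cases h2 : ("7" : String) ∈ t <;>
        simp [h, h2, eq_comm]

@[simp] theorem applyO_s8 (s : Segs) (a : String) :
    (applyO s a).s8 = if a = "8" then "&      0        &" else s.s8 := by
  unfold applyO; split_ifs <;> simp_all

@[simp] theorem foldO_s8 (l : List String) (s : Segs) :
    (l.foldl applyO s).s8 = if "8" ∈ l then "&      0        &" else s.s8 := by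
  induction l generalizing s with
  | nil => simp
  | cons a t ih =>
      rw [List.foldl_cons, ih]
      by_cases h : a = "8" <;> by_cases h2 : ("8" : String) ∈ t <;>
        simp [h, h2, eq_comm]

@[simp] theorem applyO_s9 (s : Segs) (a : String) :
    (applyO s a).s9 = if a = "9" then "       0        " else s.s9 := by
  unfold applyO; split_ifs <;> simp_all

@[simp] theorem foldO_s9 (l : List String) (s : Segs) :
    (l.foldl applyO s).s9 = if "9" ∈ l then "       0        " else s.s9 := by
  induction l generalizing s with
  | nil => simp
  | cons a t ih =>
      rw [List.foldl_cons, ih]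
      by_cases h : a = "9" <;> by_cases h2 : ("9" : String) ∈ t <;>
        simp [h, h2, eq_comm]

@[simp] theorem applyX_s1 (s : Segs) (a : String) :
    (applyX s a).s1 = if a = "1" then "       X       " else s.s1 := by
  unfold applyX; split_ifs <;> simp_all

@[simp] theorem foldX_s1 (l : List String) (s : Segs) :
    (l.foldl applyX s).s1 = if "1" ∈ l then "       X       " else s.s1 := by
  induction l generalizing s with
  | nil => simp
  | cons a t ih =>
      rw [List.foldl_cons, ih]
      by_cases h : a = "1" <;> by_cases h2 : ("1" : String) ∈ t <;>
        simp [h, h2, eq_comm]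

@[simp] theorem applyX_s2 (s : Segs) (a : String) :
    (applyX s a).s2 = if a = "2" then "&      X        &" else s.s2 := by
  unfold applyX; split_ifs <;> simp_all

@[simp] theorem foldX_s2 (l : List String) (s : Segs) :
    (l.foldl applyX s).s2 = if "2" ∈ l then "&      X        &" else s.s2 := by
  induction l generalizing s with
  | nil => simp
  | cons a t ih =>
      rw [List.foldl_cons, ih]
      by_cases h : a = "2" <;> by_cases h2 : ("2" : String) ∈ t <;>
        simp [h, h2, eq_comm]

@[simp] theorem applyX_s3 (s : Segs) (a : String) :
    (applyX s a).s3 = if a = "3" then "       X        " else s.s3 := by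
  unfold applyX; split_ifs <;> simp_all

@[simp] theorem foldX_s3 (l : List String) (s : Segs) :
    (l.foldl applyX s).s3 = if "3" ∈ l then "       X        " else s.s3 := by
  induction l generalizing s with
  | nil => simp
  | cons a t ih =>
      rw [List.foldl_cons, ih]
      by_cases h : a = "3" <;> by_cases h2 : ("3" : String) ∈ t <;>
        simp [h, h2, eq_comm]

@[simp] theorem applyX_s4 (s : Segs) (a : String) :
    (applyX s a).s4 = if a = "4" then "       X       " else s.s4 := by
  unfold applyX; split_ifs <;> simp_all

@[simp] theorem foldX_s4 (l : List String) (s : Segs) :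
    (l.foldl applyX s).s4 = if "4" ∈ l then "       X       " else s.s4 := by
  induction l generalizing s with
  | nil => simp
  | cons a t ih =>
      rw [List.foldl_cons, ih]
      by_cases h : a = "4" <;> by_cases h2 : ("4" : String) ∈ t <;>
        simp [h, h2, eq_comm]

@[simp] theorem applyX_s5 (s : Segs) (a : String) :
    (applyX s a).s5 = if a = "5" then "&      X        &" else s.s5 := by
  unfold applyX; split_ifs <;> simp_all

@[simp] theorem foldX_s5 (l : List String) (s : Segs) :
    (l.foldl applyX s).s5 = if "5" ∈ l then "&      X        &" else s.s5 := by
  induction l generalizing s with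
  | nil => simp
  | cons a t ih =>
      rw [List.foldl_cons, ih]
      by_cases h : a = "5" <;> by_cases h2 : ("5" : String) ∈ t <;>
        simp [h, h2, eq_comm]

@[simp] theorem applyX_s6 (s : Segs) (a : String) :
    (applyX s a).s6 = if a = "6" then "       X        " else s.s6 := by
  unfold applyX; split_ifs <;> simp_all

@[simp] theorem foldX_s6 (l : List String) (s : Segs) :
    (l.foldl applyX s).s6 = if "6" ∈ l then "       X        " else s.s6 := by
  induction l generalizing s with
  | nil => simp
  | cons a t ih =>
      rw [List.foldl_cons, ih]
      by_cases h : a = "6" <;> by_cases h2 : ("6" : String) ∈ t <;>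
        simp [h, h2, eq_comm]

@[simp] theorem applyX_s7 (s : Segs) (a : String) :
    (applyX s a).s7 = if a = "7" then "       X       " else s.s7 := by
  unfold applyX; split_ifs <;> simp_all

@[simp] theorem foldX_s7 (l : List String) (s : Segs) :
    (l.foldl applyX s).s7 = if "7" ∈ l then "       X       " else s.s7 := by
  induction l generalizing s with
  | nil => simp
  | cons a t ih =>
      rw [List.foldl_cons, ih]
      by_cases h : a = "7" <;> by_cases h2 : ("7" : String) ∈ t <;>
        simp [h, h2, eq_comm]

@[simp] theorem applyX_s8 (s : Segs) (a : String) :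
    (applyX s a).s8 = if a = "8" then "&      X        &" else s.s8 := by
  unfold applyX; split_ifs <;> simp_all

@[simp] theorem foldX_s8 (l : List String) (s : Segs) :
    (l.foldl applyX s).s8 = if "8" ∈ l then "&      X        &" else s.s8 := by
  induction l generalizing s with
  | nil => simp
  | cons a t ih =>
      rw [List.foldl_cons, ih]
      by_cases h : a = "8" <;> by_cases h2 : ("8" : String) ∈ t <;>
        simp [h, h2, eq_comm]

@[simp] theorem applyX_s9 (s : Segs) (a : String) :
    (applyX s a).s9 = if a = "9" then "       X        " else s.s9 := by
  unfold applyX; split_ifs <;> simp_all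

@[simp] theorem foldX_s9 (l : List String) (s : Segs) :
    (l.foldl applyX s).s9 = if "9" ∈ l then "       X        " else s.s9 := by
  induction l generalizing s with
  | nil => simp
  | cons a t ih =>
      rw [List.foldl_cons, ih]
      by_cases h : a = "9" <;> by_cases h2 : ("9" : String) ∈ t <;>
        simp [h, h2, eq_comm]


def updA (p0 pX : List String) (segs : Segs) : Segs :=
  pX.foldl applyX (p0.foldl applyO segs)

theorem segsExt (a b : Segs) (h1 : a.s1 = b.s1) (h2 : a.s2 = b.s2) (h3 : a.s3 = b.s3)
    (h4 : a.s4 = b.s4) (h5 : a.s5 = b.s5) (h6 : a.s6 = b.s6) (h7 : a.s7 = b.s7)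
    (h8 : a.s8 = b.s8) (h9 : a.s9 = b.s9) : a = b := by
  cases a; cases b; simp_all

theorem updA_idem (p0 pX : List String) (s : Segs) :
    updA p0 pX (updA p0 pX s) = updA p0 pX s := by
  apply segsExt <;> simp [updA] <;> split_ifs <;> rfl

-- one appended line of A's loop (the chunk added to st at iteration k)
def chunkA (p0 pX : List String) (segs : Segs) (k : Int) : String :=
  (if p0.length = 0 ∧ pX.length = 0 then
     if k = 5 ∨ k = 11 then "&&&&&&&&&&&&&&&&&&&&&&&&&&&&&&&&&&&&&&&&&&&&&&&"
     else "               &               &               "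
   else
     if k = 5 ∨ k = 11 then "&&&&&&&&&&&&&&&&&&&&&&&&&&&&&&&&&&&&&&&&&&&&&&&"
     else if k = 2 then segs.s1 ++ segs.s2 ++ segs.s3
     else if k = 8 then segs.s4 ++ segs.s5 ++ segs.s6
     else if k = 14 then segs.s7 ++ segs.s8 ++ segs.s9
     else "               &               &               ") ++ "\n"

theorem stepA_char (p0 pX : List String) (segs : Segs) (s : String) (k : Int) :
    stepA p0 pX (segs, s) k = (updA p0 pX segs, s ++ chunkA p0 pX (updA p0 pX segs) k) := by
  have g0 : (if p0.length ≠ 0 then p0.foldl applyO segs else segs) = p0.foldl applyO segs := by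
    cases p0 <;> simp
  have gX : ∀ t : Segs, (if pX.length ≠ 0 then pX.foldl applyX t else t) = pX.foldl applyX t := by
    intro t; cases pX <;> simp
  simp only [stepA, g0, gX, updA, chunkA]
  split_ifs <;> simp [String.append_assoc]

theorem foldl_append_str (l : List String) (x : String) :
    l.foldl (· ++ ·) x = x ++ l.foldl (· ++ ·) "" := by
  induction l generalizing x with
  | nil => simp
  | cons a t ih =>
      rw [List.foldl_cons, List.foldl_cons, ih (x ++ a), ih ("" ++ a),
        String.empty_append, String.append_assoc]

@[simp] theorem join_cons_str (a : String) (l : List String) :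
    String.join (a :: l) = a ++ String.join l := by
  simp only [String.join, List.foldl_cons, String.empty_append]
  exact foldl_append_str l a

theorem loopA (p0 pX : List String) (ks : List Int) (segs : Segs) (s : String)
    (h : updA p0 pX segs = segs) :
    ks.foldl (stepA p0 pX) (segs, s) =
      (segs, s ++ String.join (ks.map (chunkA p0 pX segs))) := by
  induction ks generalizing s with
  | nil => simp [String.join]
  | cons k t ih =>
      rw [List.foldl_cons, stepA_char, h, ih, List.map_cons, join_cons_str,
        ← String.append_assoc]

theorem segB_eq (eX e0 : List String) (d : String) (col : Int) :
    segB eX e0 d col =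
      if d ∈ eX then
        (if col = 0 then "       X       "
         else if col = 1 then "&      X        &" else "       X        ")
      else if d ∈ e0 then
        (if col = 0 then "       0       "
         else if col = 1 then "&      0        &" else "       0        ")
      else (if col = 1 then "&               &" else "               ") := by
  by_cases h1 : d ∈ eX <;> by_cases h2 : d ∈ e0 <;> simp [segB, h1, h2]

theorem pyRange18 :
    PySem.List.pyRange 0 18 1 = [0,1,2,3,4,5,6,7,8,9,10,11,12,13,14,15,16,17] := by decide

-- ===== VERDICT (by name: the statement is the Claim_ definition above) =====
set_option maxHeartbeats 2000000 in
theorem DRAW_GAME_spec : Claim_equal_DRAW_GAME := by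
  intro eX e0 st _
  unfold Spec_DRAW_GAME
  show DRAW_GAME eX e0 st = DRAW_GAME_alt eX e0 st
  show ((PySem.List.pyRange 0 18 1).foldl (stepA e0 eX) (segsInit, st)).2 = DRAW_GAME_alt eX e0 st
  rw [pyRange18, List.foldl_cons, stepA_char,
    loopA e0 eX _ _ _ (updA_idem e0 eX segsInit)]
  simp only []
  unfold DRAW_GAME_alt
  by_cases hb : e0.length = 0 ∧ eX.length = 0
  · obtain ⟨h0, hX⟩ := hb
    rw [List.length_eq_zero_iff] at h0 hX
    subst h0; subst hX
    rw [String.append_assoc]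
    congr 1
  · rw [String.append_assoc]
    congr 1
    simp only [List.length_eq_zero_iff] at hb
    simp [chunkA, hb, updA, segB_eq, segsInit, String.join, String.append_assoc]
    rw [← String.append_assoc]
    rfl
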